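-- pv_equiv track=rewrite | github.com/hamdiranu/cobarepo | Basic Programming/Live Coding/1 - Full Prima.py | fullPrima
-- ===== SOURCE A (Python) =====
-- def angkaprima(angka):
--     hasil=[]
--     faktor = 0 # initial value untuk jumlah faktor
--     for i in range(1, angka+1):
--         if angka % i == 0 :
--             faktor += 1
--             hasil.append(i)
--     if len(hasil)==2:
--         return True
--     else:
--         return False
--
-- def fullPrima(bilangan):
--     hasil=[]
--     faktor = 0 # initial value untuk jumlah faktor
--     for i in range(1, bilangan+1):
--         if bilangan % i == 0 :
--             faktor += 1
--             hasil.append(i)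
--     if len(hasil)==2:
--         checkperbilangan=[]
--         bilangan=str(bilangan)
--         for i in range(len(bilangan)):
--             checkperbilangan.append(int(bilangan[i]))
--         d=0
--         for i in checkperbilangan:
--             if angkaprima(i) == True :
--                 d+=1
--         if d==len(checkperbilangan):
--             return ("Ya")
--         else :
--             return ("Tidak")
--     else:
--         return ("Tidak")
-- ===== SOURCE B (Python) =====
-- def fullPrima(bilangan):
--     # Trial division up to sqrt instead of counting all divisors; digit check by lookup.
--     if bilangan < 2:
--         return "Tidak"
--     i = 2
--     while i * i <= bilangan:
--         if bilangan % i == 0: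
--             return "Tidak"
--         i += 1
--     return "Ya" if all(c in "2357" for c in str(bilangan)) else "Tidak"
-- ===== Notes on version B (the rewrite author's own statement) =====
-- stated objective: faster
-- what changed: Replaces the O(n) full divisor-collecting loop (run once for the number and once per digit) with trial division up to sqrt(n) with early exit, and the per-digit primality loops with a membership test against the four prime digit characters '2357'.
import Mathlib
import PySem

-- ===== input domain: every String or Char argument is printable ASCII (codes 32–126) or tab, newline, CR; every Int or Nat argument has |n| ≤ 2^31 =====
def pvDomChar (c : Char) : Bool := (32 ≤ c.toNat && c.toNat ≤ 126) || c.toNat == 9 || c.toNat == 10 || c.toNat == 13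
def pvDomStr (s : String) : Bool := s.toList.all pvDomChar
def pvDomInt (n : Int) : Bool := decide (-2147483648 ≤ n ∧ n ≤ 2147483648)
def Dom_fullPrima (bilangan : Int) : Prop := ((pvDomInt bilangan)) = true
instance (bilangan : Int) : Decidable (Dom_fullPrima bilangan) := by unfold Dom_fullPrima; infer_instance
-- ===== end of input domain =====

-- B replaces A's O(n) divisor-counting loops by trial division up to √n with early exit and a
-- prime-digit character lookup (objective: faster).

-- ===== PORT A =====
-- state is the pair (faktor, hasil), exactly the two variables A's loop updates
def angkaprima (angka : Int) : Bool :=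
  let st := (PySem.List.pyRange 1 (angka + 1)).foldl
      (fun st i => if PySem.Int.mod angka i = 0 then (st.1 + 1, st.2 ++ [i]) else st)
      ((0 : Int), ([] : List Int))
  if st.2.length = 2 then true else false

def fullPrima (bilangan : Int) : String :=
  let st := (PySem.List.pyRange 1 (bilangan + 1)).foldl
      (fun st i => if PySem.Int.mod bilangan i = 0 then (st.1 + 1, st.2 ++ [i]) else st)
      ((0 : Int), ([] : List Int))
  if st.2.length = 2 then
    let s := PySem.Int.toStr bilangan
    -- int(bilangan[i]): on this branch the index is always in range and the character is a
    -- decimal digit, so both .getD defaults are never used (exact)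
    let checkperbilangan : List Int :=
      (PySem.List.pyRange 0 (PySem.Str.len s)).foldl
        (fun acc i => acc ++ [(PySem.Int.ofChars? [(PySem.Str.pyGet? s i).getD ' ']).getD 0]) []
    let d := checkperbilangan.foldl (fun d i => if angkaprima i = true then d + 1 else d) (0 : Int)
    if d = PySem.List.len checkperbilangan then "Ya" else "Tidak"
  else "Tidak"

-- ===== PORT B =====
-- needed by trialLoop's decreasing_by
theorem pvIntLeMulSelf (i : Int) : i ≤ i * i := by
  by_cases h : i ≤ 0
  · exact le_trans h (mul_self_nonneg i)
  · nlinarith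

-- the 'while i * i <= bilangan' loop of Source B
def trialLoop (n i : Int) : Bool :=
  if h : i * i ≤ n then
    if PySem.Int.mod n i = 0 then true else trialLoop n (i + 1)
  else false
termination_by (n + 1 - i).toNat
decreasing_by have := pvIntLeMulSelf i; omega

def fullPrima_alt (bilangan : Int) : String :=
  if bilangan < 2 then "Tidak"
  else if trialLoop bilangan 2 then "Tidak"
  -- c in "2357" on a one-character c is char membership
  else if (PySem.Int.toChars bilangan).all (fun c => c == '2' || c == '3' || c == '5' || c == '7')
  then "Ya" else "Tidak"

-- ===== PRECONDITION & SPEC =====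
def Spec_fullPrima (bilangan : Int) (out : String) : Prop := out = fullPrima_alt bilangan
instance (bilangan : Int) (out : String) : Decidable (Spec_fullPrima bilangan out) := by unfold Spec_fullPrima; infer_instance

-- ===== CLAIM (what is proved, stated in full; the proofs are below) =====
def Claim_equal_fullPrima : Prop := ∀ (bilangan : Int), Dom_fullPrima bilangan → Spec_fullPrima bilangan (fullPrima bilangan)

-- ===== LEMMAS AND PROOFS =====

-- the second component of A's pair fold is the plain divisor-collecting fold
theorem pvFoldPair (p : Int → Prop) [DecidablePred p] (l : List Int) (f : Int) (h : List Int) :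
    (l.foldl (fun st i => if p i then (st.1 + 1, st.2 ++ [i]) else st) (f, h)).2
      = h ++ l.filter (fun i => decide (p i)) := by
  induction l generalizing f h with
  | nil => simp
  | cons x t ih => by_cases hx : p x <;> simp [hx, ih]

def pvDivList (n : Int) : List Int :=
  (PySem.List.pyRange 1 (n + 1)).filter (fun i => decide (i ∣ n))

theorem pvDivList_eq (n : Int) :
    ((PySem.List.pyRange 1 (n + 1)).foldl
      (fun st i => if PySem.Int.mod n i = 0 then (st.1 + 1, st.2 ++ [i]) else st)
      ((0 : Int), ([] : List Int))).2 = pvDivList n := by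
  rw [pvFoldPair (fun i => PySem.Int.mod n i = 0)]
  simp only [List.nil_append, pvDivList]
  exact List.filter_congr (fun x _ => by simp [PySem.Int.mod_eq_zero_iff_dvd])

theorem pvDivList_two_iff (n : Int) :
    (pvDivList n).length = 2 ↔ 2 ≤ n ∧ ∀ m : Int, 2 ≤ m → m < n → ¬ m ∣ n := by
  constructor
  · intro h
    have h2 : 2 ≤ n := by
      by_contra hn
      by_cases hn0 : n ≤ 0
      · rw [pvDivList, PySem.List.pyRange_one_eq_nil (by omega : n + 1 ≤ 1)] at h
        simp at h
      · have h1 : n = 1 := by omega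
        subst h1
        revert h
        decide
    refine ⟨h2, ?_⟩
    intro m hm hmn hdvd
    -- 1, m, n are three distinct members of the nodup list pvDivList n
    have hnd : (pvDivList n).Nodup := (PySem.List.nodup_pyRange_one _ _).filter _
    have mem : ∀ x : Int, 1 ≤ x → x < n + 1 → x ∣ n → x ∈ pvDivList n := by
      intro x h1 h2 hd
      simp [pvDivList, List.mem_filter, PySem.List.mem_pyRange_one, h1, h2, hd]
    have m1 : (1 : Int) ∈ pvDivList n := mem 1 (by omega) (by omega) (one_dvd n)
    have mm : m ∈ pvDivList n := mem m (by omega) (by omega) hdvd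
    have mn : n ∈ pvDivList n := mem n (by omega) (by omega) dvd_rfl
    have hsub : ({1, m, n} : Finset Int) ⊆ (pvDivList n).toFinset := by
      intro x hx
      simp only [Finset.mem_insert, Finset.mem_singleton] at hx
      rcases hx with rfl | rfl | rfl <;> simpa [List.mem_toFinset]
    have hcard : ({1, m, n} : Finset Int).card = 3 := by
      rw [Finset.card_insert_of_notMem (by simp; omega),
          Finset.card_insert_of_notMem (by simp; omega), Finset.card_singleton]
    have := Finset.card_le_card hsub
    rw [hcard, List.toFinset_card_of_nodup hnd, h] at this
    omega
  · rintro ⟨h2, hno⟩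
    have e1 : PySem.List.pyRange 1 (n + 1) = 1 :: (PySem.List.pyRange 2 n ++ [n]) := by
      rw [PySem.List.pyRange_one_succ_right (by omega : (1 : Int) ≤ n),
          PySem.List.pyRange_one_cons (by omega : (1 : Int) < n)]
      norm_num
    simp only [pvDivList, e1, List.filter_cons, List.filter_append]
    have hmid : (PySem.List.pyRange 2 n).filter (fun i => decide (i ∣ n)) = [] := by
      rw [List.filter_eq_nil_iff]
      intro m hm
      rw [PySem.List.mem_pyRange_one] at hm
      simpa using hno m hm.1 hm.2
    simp [hmid]

theorem pvTrialLoop_true_iff (n : Int) :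
    ∀ i : Int, 2 ≤ i → (trialLoop n i = true ↔ ∃ j : Int, i ≤ j ∧ j * j ≤ n ∧ j ∣ n) := by
  have key : ∀ (k : Nat) (i : Int), (n + 1 - i).toNat ≤ k → 2 ≤ i →
      (trialLoop n i = true ↔ ∃ j : Int, i ≤ j ∧ j * j ≤ n ∧ j ∣ n) := by
    intro k
    induction k with
    | zero =>
      intro i hk hi
      have hin : ¬ i * i ≤ n := fun hle => by have := pvIntLeMulSelf i; omega
      rw [trialLoop, dif_neg hin]
      simp only [Bool.false_eq_true, false_iff]
      rintro ⟨j, hij, hjj, -⟩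
      have : i * i ≤ j * j := by nlinarith
      omega
    | succ k ih =>
      intro i hk hi
      by_cases hin : i * i ≤ n
      · by_cases hmod : PySem.Int.mod n i = 0
        · rw [trialLoop, dif_pos hin, if_pos hmod]
          have hd : i ∣ n := (PySem.Int.mod_eq_zero_iff_dvd n i).mp hmod
          exact ⟨fun _ => ⟨i, le_refl i, hin, hd⟩, fun _ => rfl⟩
        · rw [trialLoop, dif_pos hin, if_neg hmod]
          have hle : i ≤ n := le_trans (pvIntLeMulSelf i) hin
          rw [ih (i + 1) (by omega) (by omega)]
          constructor
          · rintro ⟨j, hij, hjj, hd⟩; exact ⟨j, by omega, hjj, hd⟩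
          · rintro ⟨j, hij, hjj, hd⟩
            refine ⟨j, ?_, hjj, hd⟩
            rcases eq_or_lt_of_le hij with heq | h
            · exact absurd ((PySem.Int.mod_eq_zero_iff_dvd n j).mpr hd) (heq ▸ hmod)
            · omega
      · rw [trialLoop, dif_neg hin]
        simp only [Bool.false_eq_true, false_iff]
        rintro ⟨j, hij, hjj, -⟩
        have : i * i ≤ j * j := by nlinarith
        omega
  intro i hi
  exact key (n + 1 - i).toNat i (le_refl _) hi

-- both primality tests decide Nat.Prime n.toNat
theorem pvA_prime (n : Int) : (pvDivList n).length = 2 ↔ 2 ≤ n ∧ Nat.Prime n.toNat := by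
  rw [pvDivList_two_iff]
  constructor
  · rintro ⟨h2, hno⟩
    refine ⟨h2, Nat.prime_def_lt'.mpr ⟨by omega, ?_⟩⟩
    intro m hm hmn hd
    refine hno (m : Int) (by exact_mod_cast hm) (by omega) ?_
    have : (m : Int) ∣ (n.toNat : Int) := Int.natCast_dvd_natCast.mpr hd
    rwa [Int.toNat_of_nonneg (by omega)] at this
  · rintro ⟨h2, hp⟩
    refine ⟨h2, ?_⟩
    intro m hm hmn hd
    have h0 : (0 : Int) ≤ m := by omega
    have : m.toNat ∣ n.toNat := by
      rw [← Int.natCast_dvd_natCast, Int.toNat_of_nonneg h0, Int.toNat_of_nonneg (by omega)]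
      exact hd
    exact (Nat.prime_def_lt'.mp hp).2 m.toNat (by omega) (by omega) this

theorem pvB_prime (n : Int) (h2 : 2 ≤ n) : trialLoop n 2 = false ↔ Nat.Prime n.toNat := by
  rw [← Bool.not_eq_true, pvTrialLoop_true_iff n 2 (le_refl _), Nat.prime_def_le_sqrt]
  constructor
  · intro hno
    refine ⟨by omega, ?_⟩
    intro m hm hsq hd
    refine hno ⟨(m : Int), by exact_mod_cast hm, ?_, ?_⟩
    · have hmm : m * m ≤ n.toNat := Nat.le_sqrt.mp hsq
      have h' : ((m * m : Nat) : Int) ≤ ((n.toNat : Nat) : Int) := by exact_mod_cast hmm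
      rw [Int.toNat_of_nonneg (by omega : (0 : Int) ≤ n)] at h'
      push_cast at h'
      exact h'
    · have : (m : Int) ∣ (n.toNat : Int) := Int.natCast_dvd_natCast.mpr hd
      rwa [Int.toNat_of_nonneg (by omega)] at this
  · rintro ⟨-, hno⟩ ⟨j, hj2, hjj, hjd⟩
    have h0 : (0 : Int) ≤ j := by omega
    have hdn : j.toNat ∣ n.toNat := by
      rw [← Int.natCast_dvd_natCast, Int.toNat_of_nonneg h0, Int.toNat_of_nonneg (by omega)]
      exact hjd
    refine hno j.toNat (by omega) (Nat.le_sqrt.mpr ?_) hdn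
    have h' : ((j.toNat * j.toNat : Nat) : Int) ≤ ((n.toNat : Nat) : Int) := by
      push_cast
      rw [Int.toNat_of_nonneg h0, Int.toNat_of_nonneg (by omega)]
      exact hjj
    exact_mod_cast h'

-- every character produced by Nat.toDigits 10 is a decimal digit
theorem pvToDigitsCore_mem : ∀ (f n : Nat) (acc : List Char) (c : Char),
    c ∈ Nat.toDigitsCore 10 f n acc →
    c ∈ acc ∨ c ∈ ['0', '1', '2', '3', '4', '5', '6', '7', '8', '9'] := by
  intro f
  induction f with
  | zero => intro n acc c h; exact Or.inl h
  | succ f ih =>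
    intro n acc c h
    have hdig : Nat.digitChar (n % 10) ∈ ['0', '1', '2', '3', '4', '5', '6', '7', '8', '9'] := by
      have h10 : n % 10 < 10 := Nat.mod_lt _ (by omega)
      interval_cases h : n % 10 <;> simp [Nat.digitChar]
    simp only [Nat.toDigitsCore] at h
    by_cases hz : n / 10 = 0
    · rw [if_pos hz] at h
      rcases List.mem_cons.mp h with rfl | h
      · exact Or.inr hdig
      · exact Or.inl h
    · rw [if_neg hz] at h
      rcases ih _ _ _ h with h | h
      · rcases List.mem_cons.mp h with rfl | h
        · exact Or.inr hdig
        · exact Or.inl h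
      · exact Or.inr h

theorem pvToChars_digits (n : Int) (h : 0 ≤ n) :
    ∀ c ∈ PySem.Int.toChars n, c ∈ ['0', '1', '2', '3', '4', '5', '6', '7', '8', '9'] := by
  intro c hc
  simp only [PySem.Int.toChars, if_neg (by omega : ¬ n < 0)] at hc
  rcases pvToDigitsCore_mem _ _ _ _ hc with h | h
  · simp at h
  · exact h

-- per decimal digit, A's divisor-count test agrees with B's '2357' membership
theorem pvDigitCase (c : Char) (h : c ∈ ['0', '1', '2', '3', '4', '5', '6', '7', '8', '9']) :
    (angkaprima ((PySem.Int.ofChars? [c]).getD 0) = true)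
      ↔ (c == '2' || c == '3' || c == '5' || c == '7') = true := by
  fin_cases h <;> decide

theorem pvMapRangeGetD {α β : Type} (cs : List α) (g : α → β) (d : α) :
    (List.range cs.length).map (fun k => g (cs[k]?.getD d)) = cs.map g := by
  apply List.ext_getElem
  · simp
  · intro i h1 h2
    simp only [List.getElem_map, List.getElem_range]
    rw [List.getElem?_eq_getElem (by simpa using h2)]
    rfl

theorem pvCheckEq (n : Int) :
    ((PySem.List.pyRange 0 (PySem.Str.len (PySem.Int.toStr n))).foldl
        (fun acc i => acc ++ [(PySem.Int.ofChars? [(PySem.Str.pyGet? (PySem.Int.toStr n) i).getD ' ']).getD 0]) [])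
      = (PySem.Int.toChars n).map (fun c => (PySem.Int.ofChars? [c]).getD 0) := by
  rw [PySem.List.foldl_append_singleton_eq_map, List.nil_append, PySem.Str.len_eq,
      PySem.List.pyRange_zero_nat, List.map_map, ← PySem.Int.toList_toStr,
      ← pvMapRangeGetD ((PySem.Int.toStr n).toList) (fun c => (PySem.Int.ofChars? [c]).getD 0) ' ']
  apply List.map_congr_left
  intro k _
  simp [Function.comp]

-- ===== VERDICT (by name: the statement is the Claim_ definition above) =====
theorem fullPrima_spec : Claim_equal_fullPrima := by
  intro n _
  unfold Spec_fullPrima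
  simp only [fullPrima, fullPrima_alt, pvDivList_eq]
  by_cases h2 : (pvDivList n).length = 2
  · have hp := (pvA_prime n).mp h2
    have hge : 2 ≤ n := hp.1
    have hB : trialLoop n 2 = false := (pvB_prime n hge).mpr hp.2
    rw [if_pos h2, if_neg (show ¬ n < 2 by omega)]
    simp only [hB, Bool.false_eq_true, if_false]
    rw [pvCheckEq, PySem.List.foldl_count_if angkaprima, zero_add, PySem.List.len_eq]
    have hiff :
        ((List.countP angkaprima ((PySem.Int.toChars n).map (fun c => (PySem.Int.ofChars? [c]).getD 0)) : Int)
          = ((PySem.Int.toChars n).map (fun c => (PySem.Int.ofChars? [c]).getD 0)).length)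
        ↔ ((PySem.Int.toChars n).all (fun c => c == '2' || c == '3' || c == '5' || c == '7') = true) := by
      rw [Int.natCast_inj, List.length_map, List.countP_map, List.countP_eq_length, List.all_eq_true]
      constructor
      · intro hall c hc
        exact (pvDigitCase c (pvToChars_digits n (by omega) c hc)).mp (by simpa using hall c hc)
      · intro hall c hc
        simpa using (pvDigitCase c (pvToChars_digits n (by omega) c hc)).mpr (hall c hc)
    exact if_congr hiff rfl rfl
  · rw [if_neg h2]
    by_cases hlt : n < 2
    · rw [if_pos hlt]
    · rw [if_neg hlt]
      have hB : trialLoop n 2 = true := by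
        by_contra hf
        have hBf : trialLoop n 2 = false := by simpa using hf
        exact h2 ((pvA_prime n).mpr ⟨by omega, (pvB_prime n (by omega)).mp hBf⟩)
      simp [hB]
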